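-- pv_equiv track=rewrite | github.com/JakubWorek/introduction_to_computer_science_course | CW3/19.py | lonIndSeq
-- ===== SOURCE A (Python) =====
-- def lonIndSeq(T):
--     N=len(T)
--     maxLeng=1
--     indSum=0
--     elSum=T[0]
--     leng=1
--
--     for i in range(1,N):
--         if(T[i-1]<T[i]):
--             elSum+=T[i]
--             indSum+=i
--             leng+=1
--         else:
--             if(leng>maxLeng and elSum==indSum):
--                 maxLeng=leng
--             leng=1
--             indSum=i
--             elSum=T[i]
--
--     if(leng>maxLeng and elSum==indSum):
--         maxLeng=leng
--
--     return maxLeng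
-- ===== SOURCE B (Python) =====
-- def lonIndSeq(T):
--     n = len(T)
--     prefix = [0]
--     for x in T:
--         prefix.append(prefix[-1] + x)
--     best = 1
--     start = 0
--     prev = T[0]
--     for end in range(1, n):
--         cur = T[end]
--         if prev >= cur:
--             length = end - start
--             if length > best and prefix[end] - prefix[start] == (start + end - 1) * length // 2:
--                 best = length
--             start = end
--         prev = cur
--     length = n - start
--     if length > best and prefix[n] - prefix[start] == (start + n - 1) * length // 2:
--         best = length
--     return best
-- ===== Notes on version B (the rewrite author's own statement) =====
-- stated objective: alternative
-- what changed: B precomputes a prefix-sum array and scans only run boundaries keeping (best, start, prev), checking each maximal run with prefix[end]-prefix[start] against the arithmetic-series index sum, instead of A's incrementally maintained (indSum, elSum, leng) state.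
import Mathlib
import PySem

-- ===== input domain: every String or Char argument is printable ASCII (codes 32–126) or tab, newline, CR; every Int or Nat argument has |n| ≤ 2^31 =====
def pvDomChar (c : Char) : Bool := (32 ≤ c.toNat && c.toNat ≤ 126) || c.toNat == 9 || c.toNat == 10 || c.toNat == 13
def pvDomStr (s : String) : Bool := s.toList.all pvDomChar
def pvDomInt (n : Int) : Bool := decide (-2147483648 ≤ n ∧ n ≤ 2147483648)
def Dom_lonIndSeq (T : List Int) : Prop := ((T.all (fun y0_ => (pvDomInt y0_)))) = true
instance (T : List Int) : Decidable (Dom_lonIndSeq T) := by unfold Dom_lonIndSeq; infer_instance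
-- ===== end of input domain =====

-- B replaces A's incrementally maintained run sums by a prefix-sum array and the
-- arithmetic-series formula per maximal-run boundary (alternative decomposition, same cost).


-- ===== PORT A =====
-- per-iteration body of A's for-loop; state = (maxLeng, indSum, elSum, leng)
def lonStepA (T : List Int) (s : Int × Int × Int × Int) (i : Int) : Int × Int × Int × Int :=
  let maxLeng := s.1; let indSum := s.2.1; let elSum := s.2.2.1; let leng := s.2.2.2
  if PySem.List.pyGetD T (i - 1) 0 < PySem.List.pyGetD T i 0 then
    (maxLeng, indSum + i, elSum + PySem.List.pyGetD T i 0, leng + 1)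
  else
    ((if leng > maxLeng ∧ elSum = indSum then leng else maxLeng), i, PySem.List.pyGetD T i 0, 1)

-- T[0] is read with pyGetD; Pre_ (T ≠ []) excludes the one input where Python's T[0] raises
def lonIndSeq (T : List Int) : Int :=
  let N : Int := T.length
  let s := (PySem.List.pyRange 1 N 1).foldl (lonStepA T) (1, 0, PySem.List.pyGetD T 0 0, 1)
  if s.2.2.2 > s.1 ∧ s.2.2.1 = s.2.1 then s.2.2.2 else s.1

-- ===== PORT B =====
-- prefix[0..n]: prefix sums, built exactly as Source B's append loop does
def lonPrefix (T : List Int) : List Int :=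
  T.foldl (fun acc x => acc ++ [PySem.List.pyGetD acc (-1) 0 + x]) [0]

-- per-iteration body of B's loop; state = (best, start, prev)
def lonStepB (T : List Int) (pre : List Int) (s : Int × Int × Int) (e : Int) : Int × Int × Int :=
  let best := s.1; let start := s.2.1; let prev := s.2.2
  let cur := PySem.List.pyGetD T e 0
  if prev ≥ cur then
    let length := e - start
    if length > best ∧
        PySem.List.pyGetD pre e 0 - PySem.List.pyGetD pre start 0 =
          PySem.Int.floordiv ((start + e - 1) * length) 2 then
      (length, e, cur)
    else (best, e, cur)
  else (best, start, cur)

-- B's post-loop flush of the final run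
def lonFinB (pre : List Int) (n : Int) (s : Int × Int × Int) : Int :=
  let length := n - s.2.1
  if length > s.1 ∧
      PySem.List.pyGetD pre n 0 - PySem.List.pyGetD pre s.2.1 0 =
        PySem.Int.floordiv ((s.2.1 + n - 1) * length) 2 then
    length
  else s.1

-- prev is seeded from T[0] (pyGetD), just as Source B reads T[0]; Pre_ excludes the empty list
def lonIndSeq_alt (T : List Int) : Int :=
  let n : Int := T.length
  let pre := lonPrefix T
  lonFinB pre n ((PySem.List.pyRange 1 n 1).foldl (lonStepB T pre) (1, 0, PySem.List.pyGetD T 0 0))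

-- ===== PRECONDITION & SPEC =====
-- Pre_ excludes only the empty list, on which both Pythons raise IndexError (each reads T[0])
def Pre_lonIndSeq (T : List Int) : Prop := T ≠ []
instance (T : List Int) : Decidable (Pre_lonIndSeq T) := by unfold Pre_lonIndSeq; infer_instance
def pvWitness_lonIndSeq : List Int := [1, 2, 0]

def Spec_lonIndSeq (T : List Int) (out : Int) : Prop := out = lonIndSeq_alt T
instance (T : List Int) (out : Int) : Decidable (Spec_lonIndSeq T out) := by unfold Spec_lonIndSeq; infer_instance

-- ===== CLAIM (what is proved, stated in full; the proofs are below) =====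
def Claim_equal_lonIndSeq : Prop := ∀ (T : List Int), Dom_lonIndSeq T → Pre_lonIndSeq T → Spec_lonIndSeq T (lonIndSeq T)

-- ===== LEMMAS AND PROOFS =====

-- partial sums starting from s (specification device for lonPrefix)
def lonPsums (s : Int) : List Int → List Int
  | [] => []
  | x :: xs => (s + x) :: lonPsums (s + x) xs

theorem lonGetD_append_neg_one (l : List Int) (a : Int) :
    PySem.List.pyGetD (l ++ [a]) (-1) 0 = a := by
  simp [PySem.List.pyGetD, PySem.List.pyGet?, PySem.List.pyIdx?]

theorem lonPrefix_foldl (T : List Int) : ∀ (l : List Int) (a : Int),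
    T.foldl (fun acc x => acc ++ [PySem.List.pyGetD acc (-1) 0 + x]) (l ++ [a]) =
      (l ++ [a]) ++ lonPsums a T := by
  induction T with
  | nil => intro l a; simp [lonPsums]
  | cons x xs ih =>
      intro l a
      simp only [List.foldl_cons, lonGetD_append_neg_one, lonPsums]
      have := ih (l ++ [a]) (a + x)
      simpa [List.append_assoc] using this

theorem lonPrefix_eq (T : List Int) : lonPrefix T = 0 :: lonPsums 0 T := by
  have := lonPrefix_foldl T [] 0
  simpa [lonPrefix] using this

theorem lonPsums_getD (T : List Int) : ∀ (s : Int) (j : Nat), j < T.length →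
    (lonPsums s T).getD j 0 = s + ((T.take (j + 1)).sum) := by
  induction T with
  | nil => intro s j h; simp at h
  | cons x xs ih =>
      intro s j h
      cases j with
      | zero => simp [lonPsums]
      | succ j =>
          simp only [lonPsums, List.getD_cons_succ, List.take_succ_cons, List.sum_cons]
          rw [ih (s + x) j (by simpa using h)]
          ring

theorem lonPrefix_getD (T : List Int) (k : Nat) (hk : k ≤ T.length) :
    (lonPrefix T).getD k 0 = (T.take k).sum := by
  rw [lonPrefix_eq]
  cases k with
  | zero => simp
  | succ k =>
      simp only [List.getD_cons_succ]
      rw [lonPsums_getD T 0 k (by omega)]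
      simp

-- the one fact B's flush needs about prefix: pre[k+1] = pre[k] + T[k]
theorem lonPrefix_step (T : List Int) (k : Int) (hk0 : 0 ≤ k) (hk : k < (T.length : Int)) :
    PySem.List.pyGetD (lonPrefix T) (k + 1) 0 =
      PySem.List.pyGetD (lonPrefix T) k 0 + PySem.List.pyGetD T k 0 := by
  obtain ⟨m, rfl⟩ := Int.eq_ofNat_of_zero_le hk0
  have hm : m < T.length := by exact_mod_cast hk
  have h1 : ((m : Int) + 1) = ((m + 1 : Nat) : Int) := by push_cast; ring
  rw [h1, PySem.List.pyGetD_natCast, PySem.List.pyGetD_natCast, PySem.List.pyGetD_natCast]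
  rw [lonPrefix_getD T (m + 1) (by omega), lonPrefix_getD T m (by omega)]
  rw [List.sum_take_succ T m hm]
  simp [List.getD, List.getElem?_eq_getElem hm]

theorem lonPrefix_zero (T : List Int) :
    PySem.List.pyGetD (lonPrefix T) 0 0 = 0 := by
  rw [lonPrefix_eq]
  simp [PySem.List.pyGetD, PySem.List.pyGet?, PySem.List.pyIdx?]

theorem lonFloordiv_double (a : Int) : PySem.Int.floordiv (2 * a) 2 = a := by
  rw [PySem.Int.floordiv_eq_ediv_of_pos (by norm_num)]
  omega

-- A's post-loop check, as a function of the final loop state (proof-side name)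
def lonFinA (s : Int × Int × Int × Int) : Int :=
  if s.2.2.2 > s.1 ∧ s.2.2.1 = s.2.1 then s.2.2.2 else s.1

-- main loop invariant: A's fold from i to N plus its post-loop check equals
-- B's fold from i to N plus B's flush, when the two states describe the same open run
theorem lonLoop_eq (T : List Int) :
    ∀ (k : Nat) (i maxLeng indSum elSum leng start : Int),
      i + k = (T.length : Int) → 1 ≤ i →
      start = i - leng → 0 ≤ start →
      2 * indSum = (start + i - 1) * leng →
      elSum = PySem.List.pyGetD (lonPrefix T) i 0 - PySem.List.pyGetD (lonPrefix T) start 0 →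
      lonFinA ((PySem.List.pyRange i (T.length : Int) 1).foldl (lonStepA T) (maxLeng, indSum, elSum, leng)) =
      lonFinB (lonPrefix T) (T.length : Int)
        ((PySem.List.pyRange i (T.length : Int) 1).foldl (lonStepB T (lonPrefix T))
          (maxLeng, start, PySem.List.pyGetD T (i - 1) 0)) := by
  intro k
  induction k with
  | zero =>
      intro i maxLeng indSum elSum leng start hik hi hstart hstart0 hind hel
      have hiN : i = (T.length : Int) := by omega
      subst hiN
      rw [PySem.List.pyRange_one_eq_nil (le_refl _)]
      simp only [List.foldl_nil, lonFinA, lonFinB]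
      have hlen' : (T.length : Int) - start = leng := by omega
      have hprod : (start + (T.length : Int) - 1) * ((T.length : Int) - start) = 2 * indSum := by
        rw [hlen']; exact hind.symm
      rw [hprod, lonFloordiv_double, hlen', ← hel]
  | succ k ih =>
      intro i maxLeng indSum elSum leng start hik hi hstart hstart0 hind hel
      have hiN : i < (T.length : Int) := by omega
      rw [PySem.List.pyRange_one_cons hiN]
      simp only [List.foldl_cons]
      by_cases hlt : PySem.List.pyGetD T (i - 1) 0 < PySem.List.pyGetD T i 0
      · -- run extends: A updates its sums, B only advances prev
        have hA : lonStepA T (maxLeng, indSum, elSum, leng) i =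
            (maxLeng, indSum + i, elSum + PySem.List.pyGetD T i 0, leng + 1) := by
          simp [lonStepA, hlt]
        have hB : lonStepB T (lonPrefix T) (maxLeng, start, PySem.List.pyGetD T (i - 1) 0) i =
            (maxLeng, start, PySem.List.pyGetD T i 0) := by
          simp [lonStepB, not_le.mpr hlt]
        rw [hA, hB]
        have hIH := ih (i + 1) maxLeng (indSum + i) (elSum + PySem.List.pyGetD T i 0) (leng + 1) start
          (by omega) (by omega) (by omega) hstart0
          (by
            have h2 : (start + (i + 1) - 1) * (leng + 1) = (start + i - 1) * leng + leng + start + i := by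
              ring
            rw [h2, ← hind]; omega)
          (by rw [lonPrefix_step T i (by omega) hiN, hel]; ring)
        simpa using hIH
      · -- run breaks at i: both flush, then restart at i
        have hlen' : i - start = leng := by omega
        have hprod : (start + i - 1) * (i - start) = 2 * indSum := by
          rw [hlen']; exact hind.symm
        have hA : lonStepA T (maxLeng, indSum, elSum, leng) i =
            ((if leng > maxLeng ∧ elSum = indSum then leng else maxLeng), i, PySem.List.pyGetD T i 0, 1) := by
          simp [lonStepA, hlt]
        have hB : lonStepB T (lonPrefix T) (maxLeng, start, PySem.List.pyGetD T (i - 1) 0) i =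
            ((if leng > maxLeng ∧ elSum = indSum then leng else maxLeng), i, PySem.List.pyGetD T i 0) := by
          simp only [lonStepB]
          rw [if_pos (not_lt.mp hlt), hprod, lonFloordiv_double, hlen', ← hel]
          by_cases hc : leng > maxLeng ∧ elSum = indSum
          · rw [if_pos hc]; simp [hc]
          · rw [if_neg hc]; simp [hc]
        rw [hA, hB]
        have hIH := ih (i + 1) (if leng > maxLeng ∧ elSum = indSum then leng else maxLeng)
          i (PySem.List.pyGetD T i 0) 1 i
          (by omega) (by omega) (by omega) (by omega) (by omega)
          (by rw [lonPrefix_step T i (by omega) hiN]; ring)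
        simpa using hIH

-- ===== VERDICT (by name: the statement is the Claim_ definition above) =====
theorem lonIndSeq_spec : Claim_equal_lonIndSeq := by
  intro T _ hpre
  unfold Spec_lonIndSeq lonIndSeq lonIndSeq_alt
  have hlen : 1 ≤ (T.length : Int) := by
    have : T.length ≠ 0 := fun h => hpre (List.eq_nil_of_length_eq_zero h)
    omega
  have h := lonLoop_eq T (T.length - 1) 1 1 0 (PySem.List.pyGetD T 0 0) 1 0
    (by omega) (by omega) (by ring) (by omega) (by ring)
    (by
      have hs := lonPrefix_step T 0 (by omega) (by omega)
      norm_num at hs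
      rw [lonPrefix_zero, hs, lonPrefix_zero]; ring)
  norm_num at h
  simpa [lonFinA] using h
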